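-- pv_equiv track=rewrite | github.com/chris-data-pro/python-algorithm | algorithm/prefix_sum.py | max_len_contiguous_subarray_bf
-- ===== SOURCE A (Python) =====
-- def max_len_contiguous_subarray_bf(nums):
--     if not nums or len(nums) < 2:
--         return 0
--
--     for k in range(len(nums)):  # k is how many elements to take out
--         # fixed-length moving window
--         for i in range(k + 1):
--             win = nums[i:len(nums) - k + i]
--             if 2 * sum(win) == len(win):
--                 return len(win)
--     return 0
-- ===== SOURCE B (Python) =====
-- def max_len_contiguous_subarray_bf(nums):
--     # O(n): map x -> 2*x - 1; longest window with 2*sum == len is the longest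
--     # zero-sum window of the mapped array, found via prefix sums + first-occurrence dict.
--     first = {0: 0}
--     prefix = 0
--     best = 0
--     for j, x in enumerate(nums, 1):
--         prefix += 2 * x - 1
--         if prefix in first:
--             if j - first[prefix] > best:
--                 best = j - first[prefix]
--         else:
--             first[prefix] = j
--     return best
-- ===== Notes on version B (the rewrite author's own statement) =====
-- stated objective: faster
-- what changed: Replaced A's O(n^3) longest-first scan over all windows (recomputing each window's sum) by a single O(n) pass: map x to 2x-1, keep a running prefix sum and a first-occurrence dictionary, and take the longest gap between equal prefix sums.
import Mathlib
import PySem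

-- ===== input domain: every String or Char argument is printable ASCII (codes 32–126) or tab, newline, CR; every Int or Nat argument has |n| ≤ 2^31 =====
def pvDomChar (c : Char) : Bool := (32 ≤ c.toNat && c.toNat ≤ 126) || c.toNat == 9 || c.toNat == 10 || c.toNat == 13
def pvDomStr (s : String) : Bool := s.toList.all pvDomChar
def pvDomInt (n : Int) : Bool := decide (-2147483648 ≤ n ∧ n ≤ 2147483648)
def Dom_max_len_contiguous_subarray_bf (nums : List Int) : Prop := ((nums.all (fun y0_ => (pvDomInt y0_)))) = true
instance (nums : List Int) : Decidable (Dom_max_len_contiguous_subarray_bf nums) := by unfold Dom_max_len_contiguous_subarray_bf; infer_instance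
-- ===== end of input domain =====

-- B replaces A's cubic longest-first window scan by a linear pass: map x ↦ 2x-1 and find
-- the longest zero-sum window via running prefix sums and a first-occurrence dictionary.

-- ===== PORT A =====
-- inner 'for i in range(k+1)' with early return
def pvAInner (nums : List Int) (k : Int) : List Int → Option Int
  | [] => none
  | i :: is =>
    let win := PySem.List.slice nums (some i) (some ((nums.length : Int) - k + i))
    if 2 * win.sum = (win.length : Int) then some ((win.length : Int))
    else pvAInner nums k is

-- outer 'for k in range(len(nums))' with early return
def pvAOuter (nums : List Int) : List Int → Option Int
  | [] => none
  | k :: ks =>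
    match pvAInner nums k (PySem.List.pyRange 0 (k + 1) 1) with
    | some r => some r
    | none => pvAOuter nums ks

def max_len_contiguous_subarray_bf (nums : List Int) : Int :=
  if nums = [] ∨ nums.length < 2 then 0
  else
    match pvAOuter nums (PySem.List.pyRange 0 (nums.length : Int) 1) with
    | some r => r
    | none => 0

-- ===== PORT B =====
-- 'for j, x in enumerate(nums, 1)'
def pvBLoop (first : PySem.Dict Int Int) (pfx best : Int) : List (Int × Int) → Int
  | [] => best
  | (j, x) :: rest =>
    let pfx' := pfx + (2 * x - 1)
    match first.get? pfx' with
    | some i => pvBLoop first pfx' (if j - i > best then j - i else best) rest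
    | none => pvBLoop (first.insert pfx' j) pfx' best rest

def max_len_contiguous_subarray_bf_alt (nums : List Int) : Int :=
  pvBLoop (PySem.Dict.empty.insert (0 : Int) (0 : Int)) 0 0 (PySem.List.enumerate nums 1)

-- ===== PRECONDITION & SPEC =====
def Spec_max_len_contiguous_subarray_bf (nums : List Int) (out : Int) : Prop := out = max_len_contiguous_subarray_bf_alt nums
instance (nums : List Int) (out : Int) : Decidable (Spec_max_len_contiguous_subarray_bf nums out) := by unfold Spec_max_len_contiguous_subarray_bf; infer_instance

-- ===== CLAIM (what is proved, stated in full; the proofs are below) =====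
def Claim_equal_max_len_contiguous_subarray_bf : Prop := ∀ (nums : List Int), Dom_max_len_contiguous_subarray_bf nums → Spec_max_len_contiguous_subarray_bf nums (max_len_contiguous_subarray_bf nums)

-- ===== LEMMAS AND PROOFS =====

-- prefix sum of the mapped sequence: qv nums j = Σ_{t<j} (2*nums[t] - 1)
def qv (nums : List Int) (j : Nat) : Int := ((nums.take j).map (fun x => 2 * x - 1)).sum

-- is there a window of length L inside nums[0:t] with 2*sum = len?
def goodB (nums : List Int) (t L : Nat) : Bool :=
  (List.range (t + 1)).any (fun i => decide (i + L ≤ t) && (qv nums i == qv nums (i + L)))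

-- greatest such window length among windows inside nums[0:t]
def specAt (nums : List Int) (t : Nat) : Nat :=
  Nat.findGreatest (fun L => goodB nums t L = true) t

-- first index i ≤ t with qv nums i = v
def fo (nums : List Int) (t : Nat) (v : Int) : Option Nat :=
  (List.range (t + 1)).find? (fun i => qv nums i == v)

lemma sum_map_lin (l : List Int) : (l.map (fun x => 2 * x - 1)).sum = 2 * l.sum - l.length := by
  induction l with
  | nil => simp
  | cons x xs ih => simp [ih]; ring

lemma goodB_iff (nums : List Int) (t L : Nat) :
    goodB nums t L = true ↔ ∃ i, i + L ≤ t ∧ qv nums i = qv nums (i + L) := by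
  simp only [goodB, List.any_eq_true, List.mem_range, Bool.and_eq_true, decide_eq_true_eq, beq_iff_eq]
  constructor
  · rintro ⟨i, _, h1, h2⟩; exact ⟨i, h1, h2⟩
  · rintro ⟨i, h1, h2⟩; exact ⟨i, by omega, h1, h2⟩

lemma qv_window (nums : List Int) (i L : Nat) (h : i + L ≤ nums.length) :
    qv nums (i + L) - qv nums i = 2 * (((nums.drop i).take L).sum) - L := by
  have ht : nums.take (i + L) = nums.take i ++ (nums.drop i).take L := by
    rw [List.take_add]
  have hlen : ((nums.drop i).take L).length = L := by
    simp [List.length_take, List.length_drop]; omega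
  simp only [qv, ht, List.map_append, List.sum_append, sum_map_lin, hlen]
  have hli : (nums.take i).length = i := by simp; omega
  rw [hli]
  ring

lemma qv_succ (nums : List Int) (t : Nat) (h : t < nums.length) :
    qv nums (t + 1) = qv nums t + (2 * nums[t] - 1) := by
  have h2 : nums.take (t + 1) = nums.take t ++ [nums[t]] := by
    rw [List.take_add_one]; simp [List.getElem?_eq_getElem h]
  simp only [qv, h2, List.map_append, List.sum_append, List.map_cons, List.map_nil, List.sum_cons, List.sum_nil, add_zero]

-- the slice nums[i : n-k+i] for 0 ≤ i ≤ k < n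
lemma slice_window (nums : List Int) (kn i : Nat) (hk : kn < nums.length) (hi : i ≤ kn) :
    PySem.List.slice nums (some (i : Int)) (some ((nums.length : Int) - (kn : Int) + (i : Int)))
      = (nums.drop i).take (nums.length - kn) := by
  have : ((nums.length : Int) - (kn : Int) + (i : Int)) = ((i : Int) + ((nums.length - kn : Nat) : Int)) := by
    omega
  rw [this, PySem.List.slice_natCast_add]

lemma inner_eq (nums : List Int) (kn : Nat) (hk : kn < nums.length) (is : List Int)
    (his : ∀ i ∈ is, 0 ≤ i ∧ i ≤ (kn : Int)) :
    pvAInner nums (kn : Int) is =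
      (if ∃ i ∈ is, qv nums i.toNat = qv nums (i.toNat + (nums.length - kn))
       then some ((nums.length - kn : Nat) : Int) else none) := by
  induction is with
  | nil => simp [pvAInner]
  | cons i is ih =>
    obtain ⟨hi0, hik⟩ := his i (List.mem_cons_self ..)
    have hiN : i = ((i.toNat : Nat) : Int) := by omega
    have hile : i.toNat ≤ kn := by omega
    have hwin : PySem.List.slice nums (some i) (some ((nums.length : Int) - (kn : Int) + i))
        = (nums.drop i.toNat).take (nums.length - kn) := by
      rw [hiN]; exact slice_window nums kn i.toNat hk hile
    have hbound : i.toNat + (nums.length - kn) ≤ nums.length := by omega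
    have hlen : ((nums.drop i.toNat).take (nums.length - kn)).length = nums.length - kn := by
      simp [List.length_take, List.length_drop]; omega
    have hcond : (2 * ((nums.drop i.toNat).take (nums.length - kn)).sum
          = (((nums.length - kn : Nat)) : Int))
        ↔ qv nums i.toNat = qv nums (i.toNat + (nums.length - kn)) := by
      have := qv_window nums i.toNat (nums.length - kn) hbound
      omega
    simp only [pvAInner, hwin]
    by_cases hc : qv nums i.toNat = qv nums (i.toNat + (nums.length - kn))
    · rw [if_pos (by rw [hlen]; exact hcond.mpr hc)]
      rw [if_pos ⟨i, List.mem_cons_self .., hc⟩, hlen]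
    · rw [if_neg (by rw [hlen]; intro h; exact hc (hcond.mp h))]
      rw [ih (fun j hj => his j (List.mem_cons_of_mem _ hj))]
      by_cases he : ∃ j ∈ is, qv nums j.toNat = qv nums (j.toNat + (nums.length - kn))
      · rw [if_pos he, if_pos]
        obtain ⟨j, hj, hjq⟩ := he
        exact ⟨j, List.mem_cons_of_mem _ hj, hjq⟩
      · rw [if_neg he, if_neg]
        rintro ⟨j, hj, hjq⟩
        rcases List.mem_cons.mp hj with rfl | hj'
        · exact hc hjq
        · exact he ⟨j, hj', hjq⟩

lemma inner_range_eq (nums : List Int) (kn : Nat) (hk : kn < nums.length) :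
    pvAInner nums (kn : Int) (PySem.List.pyRange 0 ((kn : Int) + 1) 1) =
      (if goodB nums nums.length (nums.length - kn) = true
       then some ((nums.length - kn : Nat) : Int) else none) := by
  rw [inner_eq nums kn hk _ (by
    intro i hi
    rw [PySem.List.mem_pyRange_one] at hi
    omega)]
  congr 1
  rw [goodB_iff]
  simp only [eq_iff_iff]
  constructor
  · rintro ⟨i, hi, hq⟩
    rw [PySem.List.mem_pyRange_one] at hi
    exact ⟨i.toNat, by omega, hq⟩
  · rintro ⟨i, hi, hq⟩
    refine ⟨(i : Int), ?_, by simpa using hq⟩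
    rw [PySem.List.mem_pyRange_one]
    omega

lemma good_zero (nums : List Int) (t : Nat) : goodB nums t 0 = true := by
  rw [goodB_iff]; exact ⟨0, by omega, by simp⟩

lemma findGreatest_congr (P Q : Nat → Prop) [DecidablePred P] [DecidablePred Q]
    (h : ∀ k, P k ↔ Q k) (n : Nat) : Nat.findGreatest P n = Nat.findGreatest Q n :=
  le_antisymm (Nat.findGreatest_mono_left (fun k hk => (h k).mp hk) n)
    (Nat.findGreatest_mono_left (fun k hk => (h k).mpr hk) n)

lemma outer_eq (nums : List Int) : ∀ (fuel kn : Nat), nums.length - kn ≤ fuel → kn ≤ nums.length →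
    (∀ L, nums.length - kn < L → goodB nums nums.length L ≠ true) →
    pvAOuter nums (PySem.List.pyRange (kn : Int) (nums.length : Int) 1) =
      (if 1 ≤ specAt nums nums.length then some ((specAt nums nums.length : Nat) : Int) else none) := by
  intro fuel
  induction fuel with
  | zero =>
    intro kn h1 h2 hg
    have hkn : kn = nums.length := by omega
    subst hkn
    rw [PySem.List.pyRange_one_eq_nil (le_refl _)]
    have hz : ¬ 1 ≤ specAt nums nums.length := by
      intro hge
      have hP : goodB nums nums.length (specAt nums nums.length) = true :=
        (Nat.findGreatest_eq_iff.mp (rfl : specAt nums nums.length = _)).2.1 (by omega)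
      exact hg _ (by omega) hP
    rw [if_neg hz]
    rfl
  | succ f ih =>
    intro kn h1 h2 hg
    by_cases hlt : kn < nums.length
    · rw [PySem.List.pyRange_one_cons (by exact_mod_cast hlt)]
      show (match pvAInner nums (kn : Int) (PySem.List.pyRange 0 ((kn : Int) + 1) 1) with
            | some r => some r
            | none => pvAOuter nums (PySem.List.pyRange ((kn : Int) + 1) (nums.length : Int) 1)) = _
      rw [inner_range_eq nums kn hlt]
      by_cases hgood : goodB nums nums.length (nums.length - kn) = true
      · rw [if_pos hgood]
        have hle1 : nums.length - kn ≤ specAt nums nums.length :=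
          Nat.le_findGreatest (by omega) hgood
        have hle2 : specAt nums nums.length ≤ nums.length - kn := by
          by_contra hc
          exact hg (specAt nums nums.length) (by omega)
            ((Nat.findGreatest_eq_iff.mp (rfl : specAt nums nums.length = _)).2.1 (by omega))
        have heq : specAt nums nums.length = nums.length - kn := by omega
        rw [if_pos (by omega), heq]
      · rw [if_neg hgood]
        have hcast : ((kn : Int) + 1) = (((kn + 1 : Nat)) : Int) := by push_cast; ring
        rw [hcast]
        exact ih (kn + 1) (by omega) (by omega) (by
          intro L hL
          rcases Nat.lt_or_ge (nums.length - kn) L with h | h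
          · exact hg L h
          · have : L = nums.length - kn := by omega
            rw [this]; exact hgood)
    · have hkn : kn = nums.length := by omega
      subst hkn
      rw [PySem.List.pyRange_one_eq_nil (le_refl _)]
      have hz : ¬ 1 ≤ specAt nums nums.length := by
        intro hge
        have hP : goodB nums nums.length (specAt nums nums.length) = true :=
          (Nat.findGreatest_eq_iff.mp (rfl : specAt nums nums.length = _)).2.1 (by omega)
        exact hg _ (by omega) hP
      rw [if_neg hz]
      rfl

lemma portA_eq (nums : List Int) :
    max_len_contiguous_subarray_bf nums = ((specAt nums nums.length : Nat) : Int) := by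
  unfold max_len_contiguous_subarray_bf
  by_cases hsmall : nums = [] ∨ nums.length < 2
  · rw [if_pos hsmall]
    match nums, hsmall with
    | [], _ => rfl
    | [x], _ =>
      have h1 : goodB [x] 1 1 = false := by
        rw [Bool.eq_false_iff]
        intro h
        obtain ⟨i, hi, hq⟩ := (goodB_iff [x] 1 1).mp h
        have hiz : i = 0 := by omega
        subst hiz
        simp [qv] at hq
        omega
      show (0 : Int) = ((specAt [x] 1 : Nat) : Int)
      unfold specAt
      rw [Nat.findGreatest_succ, if_neg (by simp [h1]), Nat.findGreatest_zero]
      rfl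
    | x :: y :: t, h =>
      exfalso
      rcases h with h | h
      · exact (List.cons_ne_nil x (y :: t)) h
      · simp only [List.length_cons] at h
        omega
  · rw [if_neg hsmall]
    have hn2 : 2 ≤ nums.length := by
      rcases Nat.lt_or_ge nums.length 2 with h | h
      · exact absurd (Or.inr h) hsmall
      · exact h
    have h0 : ((0 : Nat) : Int) = (0 : Int) := rfl
    rw [← h0, outer_eq nums nums.length 0 (by omega) (by omega) (by
      intro L hL hP
      obtain ⟨i, hi, _⟩ := (goodB_iff nums nums.length L).mp hP
      omega)]
    by_cases hs : 1 ≤ specAt nums nums.length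
    · rw [if_pos hs]
    · rw [if_neg hs]
      have : specAt nums nums.length = 0 := by omega
      rw [this]

-- ===== first-occurrence facts =====

lemma fo_some (nums : List Int) (t : Nat) (v : Int) (i : Nat) (h : fo nums t v = some i) :
    i ≤ t ∧ qv nums i = v ∧ ∀ j < i, qv nums j ≠ v := by
  unfold fo at h
  rw [List.find?_eq_some_iff_getElem] at h
  obtain ⟨hq, k, hk, hkv, hmin⟩ := h
  rw [List.getElem_range] at hkv
  subst hkv
  rw [List.length_range] at hk
  refine ⟨by omega, by simpa using hq, ?_⟩
  intro j hj hjv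
  have := hmin j hj
  rw [List.getElem_range] at this
  simp [hjv] at this

lemma fo_none (nums : List Int) (t : Nat) (v : Int) (h : fo nums t v = none) :
    ∀ j ≤ t, qv nums j ≠ v := by
  unfold fo at h
  rw [List.find?_eq_none] at h
  intro j hj hv
  have := h j (List.mem_range.mpr (by omega))
  simp [hv] at this

lemma fo_succ (nums : List Int) (t : Nat) (v : Int) :
    fo nums (t + 1) v = (fo nums t v).orElse
      (fun _ => if qv nums (t + 1) == v then some (t + 1) else none) := by
  unfold fo
  rw [List.range_succ, List.find?_append]
  cases (List.range (t + 1)).find? (fun i => qv nums i == v) with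
  | none =>
    rw [Option.none_or]
    cases h : (qv nums (t + 1) == v) with
    | false => simp [List.find?, h, Option.orElse]
    | true => simp [List.find?, h, Option.orElse]
  | some i => rfl

-- ===== B-side spec-evolution lemmas =====

lemma goodB_mono (nums : List Int) (t t' L : Nat) (h : t ≤ t') (hg : goodB nums t L = true) :
    goodB nums t' L = true := by
  rw [goodB_iff] at *
  obtain ⟨i, hi, hq⟩ := hg
  exact ⟨i, by omega, hq⟩

lemma specAt_succ_none (nums : List Int) (t : Nat)
    (h : ∀ j ≤ t, qv nums j ≠ qv nums (t + 1)) : specAt nums (t + 1) = specAt nums t := by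
  have hgood : ∀ L, goodB nums (t + 1) L = true ↔ goodB nums t L = true := by
    intro L
    constructor
    · intro hg
      obtain ⟨j, hj, hq⟩ := (goodB_iff nums (t + 1) L).mp hg
      rcases Nat.lt_or_ge (j + L) (t + 1) with hc | hc
      · exact (goodB_iff nums t L).mpr ⟨j, by omega, hq⟩
      · have hjL : j + L = t + 1 := by omega
        rcases Nat.eq_zero_or_pos L with rfl | hL
        · exact good_zero nums t
        · exact absurd (by rw [← hjL]; exact hq) (h j (by omega))
    · exact goodB_mono nums t (t + 1) L (by omega)
  have hP11 : ¬ goodB nums (t + 1) (t + 1) = true := by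
    intro hg
    obtain ⟨j, hj, hq⟩ := (goodB_iff nums (t + 1) (t + 1)).mp hg
    have hjz : j = 0 := by omega
    subst hjz
    exact h 0 (by omega) (by simpa using hq)
  show Nat.findGreatest _ (t + 1) = Nat.findGreatest _ t
  rw [Nat.findGreatest_succ, if_neg hP11]
  exact findGreatest_congr _ _ hgood t

lemma specAt_succ_some (nums : List Int) (t i : Nat) (hi : i ≤ t)
    (hq : qv nums i = qv nums (t + 1))
    (hmin : ∀ j < i, qv nums j ≠ qv nums (t + 1)) :
    specAt nums (t + 1) = max (specAt nums t) (t + 1 - i) := by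
  apply le_antisymm
  · set m := specAt nums (t + 1) with hm
    rcases Nat.eq_zero_or_pos m with h0 | hpos
    · omega
    · have hP : goodB nums (t + 1) m = true :=
        (Nat.findGreatest_eq_iff.mp hm.symm).2.1 (by omega)
      obtain ⟨j, hj, hq'⟩ := (goodB_iff nums (t + 1) m).mp hP
      rcases Nat.lt_or_ge (j + m) (t + 1) with hc | hc
      · have : m ≤ specAt nums t :=
          Nat.le_findGreatest (by omega) ((goodB_iff nums t m).mpr ⟨j, by omega, hq'⟩)
        omega
      · have hjm : j + m = t + 1 := by omega
        have hqj : qv nums j = qv nums (t + 1) := by rw [← hjm]; exact hq'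
        have hij : i ≤ j := by
          by_contra hc2
          exact hmin j (by omega) hqj
        omega
  · apply max_le
    · exact Nat.findGreatest_mono (fun L => goodB_mono nums t (t + 1) L (by omega)) (by omega)
    · exact Nat.le_findGreatest (by omega)
        ((goodB_iff nums (t + 1) (t + 1 - i)).mpr ⟨i, by omega, by rw [show i + (t + 1 - i) = t + 1 by omega]; exact hq⟩)

-- ===== B loop invariant =====

lemma bloop_eq (nums : List Int) : ∀ (fuel t : Nat) (d : PySem.Dict Int Int) (b : Int),
    nums.length - t ≤ fuel → t ≤ nums.length →
    (∀ v, d.get? v = Option.map (fun i : Nat => (i : Int)) (fo nums t v)) →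
    b = ((specAt nums t : Nat) : Int) →
    pvBLoop d (qv nums t) b (PySem.List.enumerate (nums.drop t) ((t : Int) + 1)) =
      ((specAt nums nums.length : Nat) : Int) := by
  intro fuel
  induction fuel with
  | zero =>
    intro t d b h1 h2 hd hb
    have ht : t = nums.length := by omega
    subst ht
    rw [List.drop_length, PySem.List.enumerate_nil]
    exact hb
  | succ f ih =>
    intro t d b h1 h2 hd hb
    by_cases hlt : t < nums.length
    · rw [List.drop_eq_getElem_cons hlt, PySem.List.enumerate_cons]
      show pvBLoop d (qv nums t) b (((t : Int) + 1, nums[t]) :: _) = _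
      have hpfx : qv nums t + (2 * nums[t] - 1) = qv nums (t + 1) := (qv_succ nums t hlt).symm
      have hrest : ((t : Int) + 1 + 1) = (((t + 1 : Nat)) : Int) + 1 := by push_cast; ring
      simp only [pvBLoop, hpfx, hrest]
      rw [hd (qv nums (t + 1))]
      cases hfo : fo nums t (qv nums (t + 1)) with
      | some i =>
        obtain ⟨hit, hqi, hmin⟩ := fo_some nums t _ i hfo
        simp only [Option.map_some]
        have hd' : ∀ v, d.get? v = Option.map (fun j : Nat => (j : Int)) (fo nums (t + 1) v) := by
          intro v
          rw [fo_succ, hd v]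
          cases hfv : fo nums t v with
          | some j => rfl
          | none =>
            have hne : (qv nums (t + 1) == v) = false := by
              simp only [beq_eq_false_iff_ne, ne_eq]
              intro hvv
              rw [hvv] at hfo
              rw [hfo] at hfv
              exact (Option.some_ne_none i) hfv
            show Option.map _ none = Option.map _ (Option.orElse none _)
            simp [Option.orElse, hne]
        have hb' : (if (t : Int) + 1 - (i : Int) > b then (t : Int) + 1 - (i : Int) else b)
            = ((specAt nums (t + 1) : Nat) : Int) := by
          rw [specAt_succ_some nums t i hit hqi hmin, hb]
          have : ((max (specAt nums t) (t + 1 - i) : Nat) : Int)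
              = max ((specAt nums t : Nat) : Int) ((t : Int) + 1 - (i : Int)) := by
            push_cast [Nat.cast_max]
            omega
          rw [this]
          split_ifs with hgt <;> omega
        rw [hb']
        exact ih (t + 1) d _ (by omega) (by omega) hd' rfl
      | none =>
        simp only [Option.map_none]
        have hnone := fo_none nums t _ hfo
        have hd' : ∀ v, (d.insert (qv nums (t + 1)) ((t : Int) + 1)).get? v
            = Option.map (fun j : Nat => (j : Int)) (fo nums (t + 1) v) := by
          intro v
          rw [PySem.Dict.get?_insert, fo_succ, hd v]
          by_cases hv : v = qv nums (t + 1)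
          · subst hv
            rw [if_pos rfl, hfo]
            simp [Option.orElse]
          · rw [if_neg hv]
            cases hfv : fo nums t v with
            | some j => rfl
            | none =>
              have hne : (qv nums (t + 1) == v) = false := by
                simp only [beq_eq_false_iff_ne, ne_eq]
                exact fun hc => hv hc.symm
              show Option.map _ none = Option.map _ (Option.orElse none _)
              simp [Option.orElse, hne]
        have hb' : b = ((specAt nums (t + 1) : Nat) : Int) := by
          rw [specAt_succ_none nums t hnone]
          exact hb
        exact ih (t + 1) _ _ (by omega) (by omega) hd' hb'
    · have ht : t = nums.length := by omega
      subst ht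
      rw [List.drop_length, PySem.List.enumerate_nil]
      exact hb

lemma portB_eq (nums : List Int) :
    max_len_contiguous_subarray_bf_alt nums = ((specAt nums nums.length : Nat) : Int) := by
  unfold max_len_contiguous_subarray_bf_alt
  have hq0 : qv nums 0 = 0 := by simp [qv]
  have hd : ∀ v, (PySem.Dict.empty.insert (0 : Int) (0 : Int)).get? v
      = Option.map (fun i : Nat => (i : Int)) (fo nums 0 v) := by
    intro v
    rw [PySem.Dict.get?_insert]
    unfold fo
    by_cases hv : v = 0
    · subst hv
      simp [List.range_one, hq0]
    · simp [List.range_one, hq0, hv]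
      exact fun hc => hv hc.symm
  have hb0 : (0 : Int) = ((specAt nums 0 : Nat) : Int) := rfl
  have h := bloop_eq nums nums.length 0 (PySem.Dict.empty.insert (0 : Int) (0 : Int)) 0
    (by omega) (by omega) hd hb0
  rw [hq0, List.drop_zero] at h
  norm_num at h
  exact h

-- ===== VERDICT (by name: the statement is the Claim_ definition above) =====
theorem max_len_contiguous_subarray_bf_spec : Claim_equal_max_len_contiguous_subarray_bf := by
  intro nums _
  unfold Spec_max_len_contiguous_subarray_bf
  rw [portA_eq, portB_eq]
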